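-- pv_equiv track=rewrite | github.com/bestainan/GameLogServer | apps/logs/daily_log_dat.py | split_log_users_level
-- ===== SOURCE A (Python) =====
-- def split_log_users_level(log_lst):
--     """
--         拆分日志列表
--         {
--             _uid: _level 列表中玩家最高等级
--         }
--     """
--     user_level_dict = dict()
--     for _log in log_lst:
--         _uid = _log['uid']
--         _level = _log['level']
--         if _level > user_level_dict.get(_uid, 0):
--             user_level_dict[_uid] = _level
--
--     return user_level_dict
-- ===== SOURCE B (Python) =====
-- def split_log_users_level(log_lst):
--     """For each player, the highest level seen in the logs.
--
--     A record whose level is not positive carries no level information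
--     (players start at level 1), so it contributes nothing.
--     """
--     # keep only the records that report a reached level
--     level_ups = [(log['uid'], log['level']) for log in log_lst if log['level'] >= 1]
--     # group the reported levels by player
--     by_uid = {}
--     for uid, level in level_ups:
--         by_uid.setdefault(uid, []).append(level)
--     # reduce each group to its maximum
--     return {uid: max(levels) for uid, levels in by_uid.items()}
-- ===== Notes on version B (the rewrite author's own statement) =====
-- stated objective: alternative
-- what changed: Replaces A's incremental running-max dict scan (compare-and-overwrite against get(uid,0)) with a three-stage pipeline: filter the records that report a reached level, group those levels by uid with setdefault, then reduce each group to its max in a dict comprehension. Pre_ excludes only inputs where some log lacks the 'uid' or 'level' key, on which A raises KeyError.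
import Mathlib
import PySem

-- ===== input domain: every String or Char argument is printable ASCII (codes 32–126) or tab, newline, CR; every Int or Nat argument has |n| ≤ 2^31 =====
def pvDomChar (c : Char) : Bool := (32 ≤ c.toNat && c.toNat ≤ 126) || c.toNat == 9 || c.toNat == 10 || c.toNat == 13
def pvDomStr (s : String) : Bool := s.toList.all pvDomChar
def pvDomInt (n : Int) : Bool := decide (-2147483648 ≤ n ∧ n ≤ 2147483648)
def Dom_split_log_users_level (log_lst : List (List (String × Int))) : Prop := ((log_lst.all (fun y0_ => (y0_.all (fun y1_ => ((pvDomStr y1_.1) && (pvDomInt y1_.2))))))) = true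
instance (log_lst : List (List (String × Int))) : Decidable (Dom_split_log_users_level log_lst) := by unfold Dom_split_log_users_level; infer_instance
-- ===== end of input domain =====

-- B replaces A's incremental running-max dict scan with a filter/group/reduce pipeline
-- (keep the records with a reported level, group the levels by uid, take each group's max);
-- alternative structure, same cost.

-- ===== PORT A =====
-- _log[k] on the dict built from the pair list; none = KeyError, excluded by Pre_ (default 0 is never used inside Pre_)
def pvEntry (log : List (String × Int)) (k : String) : Int :=
  ((PySem.Dict.ofList log).get? k).getD 0

def pvStepA (d : PySem.Dict Int Int) (log : List (String × Int)) : PySem.Dict Int Int :=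
  let uid := pvEntry log "uid"
  let lvl := pvEntry log "level"
  if d.getD uid 0 < lvl then d.insert uid lvl else d

def split_log_users_level (log_lst : List (List (String × Int))) : List (Int × Int) :=
  (log_lst.foldl pvStepA PySem.Dict.empty).items

-- ===== PORT B =====
-- max(ls) for the nonempty group lists; none = ValueError on empty, unreachable here
def pvMax (ls : List Int) : Int :=
  match PySem.List.max? ls (fun y => y) with
  | some m => m
  | none => 0

-- grouping step: by_uid.setdefault(uid, []).append(level)
def pvStepG (g : PySem.Dict Int (List Int)) (p : Int × Int) : PySem.Dict Int (List Int) :=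
  g.modify p.1 [] (· ++ [p.2])

-- the final dict comprehension iterates by_uid.items (unique keys), so it is a map over the items
def split_log_users_level_alt (log_lst : List (List (String × Int))) : List (Int × Int) :=
  let level_ups := (log_lst.filter (fun log => 1 ≤ pvEntry log "level")).map
    (fun log => (pvEntry log "uid", pvEntry log "level"))
  let by_uid := level_ups.foldl pvStepG PySem.Dict.empty
  by_uid.items.map (fun p => (p.1, pvMax p.2))

-- ===== PRECONDITION & SPEC =====
-- Pre_: every log dict has the keys 'uid' and 'level'; otherwise Python A raises KeyError.
def Pre_split_log_users_level (log_lst : List (List (String × Int))) : Prop :=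
  ∀ log ∈ log_lst, "uid" ∈ log.map Prod.fst ∧ "level" ∈ log.map Prod.fst
instance (log_lst : List (List (String × Int))) : Decidable (Pre_split_log_users_level log_lst) := by
  unfold Pre_split_log_users_level; infer_instance

def pvWitness_split_log_users_level : (List (List (String × Int))) :=
  [[("uid", 1), ("level", 3)], [("uid", 1), ("level", 2)], [("uid", 2), ("level", 0)]]

def Spec_split_log_users_level (log_lst : List (List (String × Int))) (out : List (Int × Int)) : Prop := out = split_log_users_level_alt log_lst
instance (log_lst : List (List (String × Int))) (out : List (Int × Int)) : Decidable (Spec_split_log_users_level log_lst out) := by unfold Spec_split_log_users_level; infer_instance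

-- ===== CLAIM (what is proved, stated in full; the proofs are below) =====
def Claim_equal_split_log_users_level : Prop := ∀ (log_lst : List (List (String × Int))), Dom_split_log_users_level log_lst → Pre_split_log_users_level log_lst → Spec_split_log_users_level log_lst (split_log_users_level log_lst)

-- ===== LEMMAS AND PROOFS =====

-- proof-side view of B's first two stages fused: one conditional grouping step per log
def pvStepB (g : PySem.Dict Int (List Int)) (log : List (String × Int)) : PySem.Dict Int (List Int) :=
  if 0 < pvEntry log "level" then g.modify (pvEntry log "uid") [] (· ++ [pvEntry log "level"]) else g

-- B's filter-then-map-then-fold equals the fused conditional fold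
theorem pvPipeline_eq_fused (logs : List (List (String × Int))) (g : PySem.Dict Int (List Int)) :
    ((logs.filter (fun log => 1 ≤ pvEntry log "level")).map
      (fun log => (pvEntry log "uid", pvEntry log "level"))).foldl pvStepG g
    = logs.foldl pvStepB g := by
  induction logs generalizing g with
  | nil => rfl
  | cons log rest ih =>
    by_cases h : 1 ≤ pvEntry log "level"
    · have h' : 0 < pvEntry log "level" := by omega
      rw [List.filter_cons, if_pos (by simp [h]), List.map_cons, List.foldl_cons, ih,
        List.foldl_cons]
      congr 1
      simp [pvStepG, pvStepB, h']
    · have h' : ¬ 0 < pvEntry log "level" := by omega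
      rw [List.filter_cons, if_neg (by simp [h]), ih, List.foldl_cons]
      congr 1
      simp [pvStepB, h']

-- the reduction f : a group entry to its maximum
def pvRed (p : Int × List Int) : Int × Int := (p.1, pvMax p.2)

theorem pvMax_append_singleton (ls : List Int) (hne : ls ≠ []) (l : Int) :
    pvMax (ls ++ [l]) = max (pvMax ls) l := by
  cases ls with
  | nil => exact absurd rfl hne
  | cons x t =>
    simp [pvMax, PySem.List.max?_id_cons, List.foldl_append]

theorem pvMax_pos (ls : List Int) (hne : ls ≠ []) (hp : ∀ x ∈ ls, 0 < x) : 0 < pvMax ls := by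
  cases h : PySem.List.max? ls (fun y => y) with
  | none => exact absurd ((PySem.List.max?_eq_none_iff ls (fun y => y)).mp h) hne
  | some m =>
    have hm : m ∈ ls := PySem.List.max?_mem h
    simpa [pvMax, h] using hp m hm

theorem pvGet?_map_red (l : List (Int × List Int)) (k : Int) :
    (PySem.Dict.mk (l.map pvRed)).get? k = ((PySem.Dict.mk l).get? k).map pvMax := by
  induction l with
  | nil => simp [PySem.Dict.get?]
  | cons p t ih =>
    rw [show (p :: t).map pvRed = pvRed p :: t.map pvRed from rfl,
      PySem.Dict.get?_mk_cons, PySem.Dict.get?_mk_cons]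
    by_cases h : p.1 = k
    · simp [pvRed, h]
    · simp [pvRed, h, ih]

theorem pvGetD_map_red (g : PySem.Dict Int (List Int)) (k : Int) :
    (PySem.Dict.mk (g.items.map pvRed)).getD k 0 = pvMax (g.getD k []) := by
  rw [PySem.Dict.getD_eq_get?_getD, PySem.Dict.getD_eq_get?_getD]
  have : (PySem.Dict.mk g.items) = g := rfl
  rw [pvGet?_map_red, this]
  cases h : g.get? k with
  | none => simp [pvMax, PySem.List.max?]
  | some ls => simp

theorem pvContains_map_red (g : PySem.Dict Int (List Int)) (k : Int) :
    (PySem.Dict.mk (g.items.map pvRed)).contains k = g.contains k := by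
  rw [PySem.Dict.contains_eq_isSome_get?, PySem.Dict.contains_eq_isSome_get?]
  have : (PySem.Dict.mk g.items) = g := rfl
  rw [pvGet?_map_red, this]
  cases g.get? k <;> simp

-- one entry of a Nodup-key dict determines any entry with the same key
theorem pvEntry_unique (g : PySem.Dict Int (List Int)) (hnd : g.keys.Nodup)
    {u : Int} {ls : List Int} (hmem : (u, ls) ∈ g.items) {p : Int × List Int}
    (hp : p ∈ g.items) (hk : p.1 = u) : p = (u, ls) := by
  have h1 : g.get? u = some ls := PySem.Dict.get?_of_mem_items g hmem hnd
  have h2 : g.get? p.1 = some p.2 := PySem.Dict.get?_of_mem_items g hp hnd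
  rw [hk, h1] at h2
  obtain ⟨a, b⟩ := p
  simp_all

-- the single fold step preserves the map-red relation between the two states
theorem pvStep_red (g : PySem.Dict Int (List Int)) (log : List (String × Int))
    (hpos : ∀ p ∈ g.items, p.2 ≠ [] ∧ ∀ x ∈ p.2, 0 < x) (hnd : g.keys.Nodup) :
    pvStepA (PySem.Dict.mk (g.items.map pvRed)) log = PySem.Dict.mk ((pvStepB g log).items.map pvRed) := by
  set u := pvEntry log "uid" with hu
  set l := pvEntry log "level" with hl
  have hgd : (PySem.Dict.mk (g.items.map pvRed)).getD u 0 = pvMax (g.getD u []) := pvGetD_map_red g u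
  by_cases hpl : 0 < l
  · -- B groups the level; A compares against the current max
    have hstepB : pvStepB g log = g.insert u (g.getD u [] ++ [l]) := by
      simp [pvStepB, PySem.Dict.modify, hpl, ← hu, ← hl]
    by_cases hc : g.contains u = true
    · -- uid already grouped
      obtain ⟨ls, hls⟩ : ∃ ls, g.get? u = some ls := by
        have := PySem.Dict.contains_eq_isSome_get? (d := g) (k := u)
        rw [hc] at this
        cases h : g.get? u with
        | none => rw [h] at this; simp at this
        | some ls => exact ⟨ls, rfl⟩
      have hmem : (u, ls) ∈ g.items := PySem.Dict.mem_items_of_get?_eq_some g hls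
      have hlsfacts := hpos (u, ls) hmem
      have hlsne : ls ≠ [] := hlsfacts.1
      have hlspos : ∀ x ∈ ls, 0 < x := hlsfacts.2
      have hgdu : g.getD u [] = ls := PySem.Dict.getD_of_get?_eq_some g [] hls
      have hcd : (PySem.Dict.mk (g.items.map pvRed)).contains u = true := by
        rw [pvContains_map_red]; exact hc
      have hmaxapp : pvMax (ls ++ [l]) = max (pvMax ls) l := pvMax_append_singleton ls hlsne l
      apply PySem.Dict.ext
      rw [hstepB, PySem.Dict.items_insert_of_contains g _ hc, hgdu]
      by_cases hlt : pvMax ls < l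
      · -- A overwrites in place
        have : pvStepA (PySem.Dict.mk (g.items.map pvRed)) log = (PySem.Dict.mk (g.items.map pvRed)).insert u l := by
          simp [pvStepA, ← hu, ← hl, hgd, hgdu, hlt]
        rw [this, PySem.Dict.items_insert_of_contains _ _ hcd]
        simp only [List.map_map]
        apply List.map_congr_left
        intro p hp
        by_cases hk : p.1 = u
        · simp [Function.comp, pvRed, hk, hmaxapp, max_eq_right (le_of_lt hlt)]
        · simp [Function.comp, pvRed, hk]
      · -- A leaves the dict unchanged; the appended level does not change the max
        have : pvStepA (PySem.Dict.mk (g.items.map pvRed)) log = PySem.Dict.mk (g.items.map pvRed) := by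
          simp [pvStepA, ← hu, ← hl, hgd, hgdu, hlt]
        rw [this]
        simp only [List.map_map]
        apply List.map_congr_left
        intro p hp
        by_cases hk : p.1 = u
        · have hpeq : p = (u, ls) := pvEntry_unique g hnd hmem hp hk
          subst hpeq
          simp [Function.comp, pvRed, hmaxapp, max_eq_left (not_lt.mp hlt)]
        · simp [Function.comp, pvRed, hk]
    · -- fresh uid: both append
      have hcf : g.contains u = false := by simpa using hc
      have hgdu : g.getD u [] = [] := PySem.Dict.getD_of_not_contains g [] hcf
      have hcd : (PySem.Dict.mk (g.items.map pvRed)).contains u = false := by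
        rw [pvContains_map_red]; exact hcf
      have hlt : pvMax (g.getD u []) < l := by
        rw [hgdu]; simpa [pvMax, PySem.List.max?] using hpl
      have hA : pvStepA (PySem.Dict.mk (g.items.map pvRed)) log = (PySem.Dict.mk (g.items.map pvRed)).insert u l := by
        simp [pvStepA, ← hu, ← hl, hgd, hlt]
      apply PySem.Dict.ext
      rw [hA, hstepB, PySem.Dict.items_insert_of_not_contains _ _ hcd,
        PySem.Dict.items_insert_of_not_contains _ _ hcf, hgdu]
      simp [pvRed, pvMax, PySem.List.max?_id_cons]
  · -- level ≤ 0: both steps are no-ops (A's current value is 0 or a positive max)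
    have hB : pvStepB g log = g := by simp [pvStepB, ← hl, hpl]
    have hge : 0 ≤ pvMax (g.getD u []) := by
      cases h : g.get? u with
      | none =>
        rw [PySem.Dict.getD_of_get?_eq_none g _ h]
        simp [pvMax, PySem.List.max?]
      | some ls =>
        rw [PySem.Dict.getD_of_get?_eq_some g _ h]
        have hmem : (u, ls) ∈ g.items := PySem.Dict.mem_items_of_get?_eq_some g h
        have := hpos (u, ls) hmem
        exact le_of_lt (pvMax_pos ls this.1 this.2)
    have hA : pvStepA (PySem.Dict.mk (g.items.map pvRed)) log = PySem.Dict.mk (g.items.map pvRed) := by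
      simp only [pvStepA, ← hu, ← hl, hgd]
      rw [if_neg (by omega)]
    rw [hA, hB]

-- the grouping step preserves the positivity/nonemptiness invariant
theorem pvStep_inv (g : PySem.Dict Int (List Int)) (log : List (String × Int))
    (hpos : ∀ p ∈ g.items, p.2 ≠ [] ∧ ∀ x ∈ p.2, 0 < x) :
    ∀ p ∈ (pvStepB g log).items, p.2 ≠ [] ∧ ∀ x ∈ p.2, 0 < x := by
  intro p hp
  by_cases hpl : 0 < pvEntry log "level"
  · have hstepB : pvStepB g log = g.insert (pvEntry log "uid") (g.getD (pvEntry log "uid") [] ++ [pvEntry log "level"]) := by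
      simp [pvStepB, PySem.Dict.modify, hpl]
    rw [hstepB] at hp
    rcases (PySem.Dict.mem_items_insert _ _ _ _).mp hp with h | h
    · subst h
      refine ⟨by simp, ?_⟩
      intro x hx
      rcases List.mem_append.mp hx with hx | hx
      · cases hgu : g.get? (pvEntry log "uid") with
        | none => rw [PySem.Dict.getD_of_get?_eq_none g _ hgu] at hx; simp at hx
        | some ls =>
          rw [PySem.Dict.getD_of_get?_eq_some g [] hgu] at hx
          exact (hpos _ (PySem.Dict.mem_items_of_get?_eq_some g hgu)).2 x hx
      · simp at hx; omega
    · exact hpos p h.1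
  · have hB : pvStepB g log = g := by simp [pvStepB, hpl]
    rw [hB] at hp
    exact hpos p hp

theorem pvStep_nodup (g : PySem.Dict Int (List Int)) (log : List (String × Int))
    (hnd : g.keys.Nodup) : (pvStepB g log).keys.Nodup := by
  by_cases hpl : 0 < pvEntry log "level"
  · have hstepB : pvStepB g log = g.insert (pvEntry log "uid") (g.getD (pvEntry log "uid") [] ++ [pvEntry log "level"]) := by
      simp [pvStepB, PySem.Dict.modify, hpl]
    rw [hstepB]
    exact PySem.Dict.nodup_keys_insert _ _ _ hnd
  · have hB : pvStepB g log = g := by simp [pvStepB, hpl]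
    rw [hB]; exact hnd

-- the full-fold invariant: A's state is always the pointwise max of B's groups
theorem pvFold_red (logs : List (List (String × Int))) (g : PySem.Dict Int (List Int))
    (hpos : ∀ p ∈ g.items, p.2 ≠ [] ∧ ∀ x ∈ p.2, 0 < x) (hnd : g.keys.Nodup) :
    logs.foldl pvStepA (PySem.Dict.mk (g.items.map pvRed)) = PySem.Dict.mk ((logs.foldl pvStepB g).items.map pvRed) := by
  induction logs generalizing g with
  | nil => rfl
  | cons log rest ih =>
    simp only [List.foldl_cons]
    rw [pvStep_red g log hpos hnd]
    exact ih (pvStepB g log) (pvStep_inv g log hpos) (pvStep_nodup g log hnd)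

-- ===== VERDICT (by name: the statement is the Claim_ definition above) =====
theorem split_log_users_level_spec : Claim_equal_split_log_users_level := by
  intro log_lst _ _
  unfold Spec_split_log_users_level split_log_users_level split_log_users_level_alt
  show (log_lst.foldl pvStepA PySem.Dict.empty).items
      = (((log_lst.filter (fun log => 1 ≤ pvEntry log "level")).map
          (fun log => (pvEntry log "uid", pvEntry log "level"))).foldl pvStepG
          PySem.Dict.empty).items.map (fun p => (p.1, pvMax p.2))
  rw [pvPipeline_eq_fused]
  have h := pvFold_red log_lst PySem.Dict.empty (by intro p hp; simp [PySem.Dict.empty] at hp) (by simp [PySem.Dict.empty, PySem.Dict.keys])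
  have he : (PySem.Dict.mk ((PySem.Dict.empty : PySem.Dict Int (List Int)).items.map pvRed)) = (PySem.Dict.empty : PySem.Dict Int Int) := rfl
  rw [he] at h
  rw [h]
  rfl
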